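-- pv_equiv track=rewrite | github.com/paketner/advent_of_code_2018 | advent_day2_part1.py | parse_box_id
-- ===== SOURCE A (Python) =====
-- import collections
--
-- def parse_box_id(box_id):
--     '''
--     Determine if there are double and / or triple letter entries in the supplied string
--
--     Args:
--       box_id (str) - random(ish) string of letters
--
--     Returns:
--       double_letter (bool) - True if there are exactly two of any same letter found
--       triple_letter (bool) - True if there are exaclty three of any same letter found
--     '''
--     counter = collections.Counter(list(box_id))
--     double_letter = False
--     triple_letter = False
--     for key in counter:
--         if counter[key] == 2:
--             double_letter = True
--         if counter[key] == 3:
--             triple_letter = True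
--     return(double_letter, triple_letter)
-- ===== SOURCE B (Python) =====
-- def parse_box_id(box_id):
--     # Sort the characters, then scan consecutive equal runs collecting run lengths.
--     s = sorted(box_id)
--     lengths = []
--     i = 0
--     while i < len(s):
--         j = i
--         while j < len(s) and s[j] == s[i]:
--             j += 1
--         lengths.append(j - i)
--         i = j
--     return (2 in lengths, 3 in lengths)
-- ===== Notes on version B (the rewrite author's own statement) =====
-- stated objective: alternative
-- what changed: Replaced the Counter hash-count plus key scan by sorting the characters and walking consecutive equal runs, testing whether any run has length 2 or 3.
import Mathlib
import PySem

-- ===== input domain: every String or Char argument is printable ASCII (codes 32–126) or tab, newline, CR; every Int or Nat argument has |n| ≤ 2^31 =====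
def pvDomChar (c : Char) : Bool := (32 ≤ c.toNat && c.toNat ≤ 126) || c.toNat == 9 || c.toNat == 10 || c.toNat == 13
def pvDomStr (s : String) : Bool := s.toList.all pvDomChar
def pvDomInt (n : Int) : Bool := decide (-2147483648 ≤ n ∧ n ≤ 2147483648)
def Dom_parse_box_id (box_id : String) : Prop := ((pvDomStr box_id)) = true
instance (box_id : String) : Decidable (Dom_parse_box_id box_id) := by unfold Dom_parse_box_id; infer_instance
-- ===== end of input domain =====

-- B replaces the Counter + key scan by sort-then-scan over consecutive equal runs (alternative algorithm, same result).

-- ===== PORT A =====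
def parse_box_id (box_id : String) : Bool × Bool :=
  let counter := PySem.Dict.counter box_id.toList
  counter.keys.foldl
    (fun (st : Bool × Bool) key =>
      let st := if counter.getD key 0 == 2 then (true, st.2) else st
      if counter.getD key 0 == 3 then (st.1, true) else st)
    (false, false)

-- ===== PORT B =====
-- the inner while loop scans the current run (takeWhile); the outer loop resumes after it (dropWhile)
def pvRunLengths : List Char → List Int
  | [] => []
  | c :: t =>
      ((t.takeWhile (fun x => x == c)).length + 1 : Int)
        :: pvRunLengths (t.dropWhile (fun x => x == c))
termination_by l => l.length
decreasing_by
  have := List.length_dropWhile_le (fun x => x == c) t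
  simp only [List.length_cons]
  omega

def parse_box_id_alt (box_id : String) : Bool × Bool :=
  let s := PySem.List.sorted box_id.toList (fun c => c) false
  let lengths := pvRunLengths s
  (lengths.contains 2, lengths.contains 3)

-- ===== PRECONDITION & SPEC =====
def Spec_parse_box_id (box_id : String) (out : Bool × Bool) : Prop := out = parse_box_id_alt box_id
instance (box_id : String) (out : Bool × Bool) : Decidable (Spec_parse_box_id box_id out) := by unfold Spec_parse_box_id; infer_instance

-- ===== CLAIM (what is proved, stated in full; the proofs are below) =====
def Claim_equal_parse_box_id : Prop := ∀ (box_id : String), Dom_parse_box_id box_id → Spec_parse_box_id box_id (parse_box_id box_id)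

-- ===== LEMMAS AND PROOFS =====

-- A's key loop is the pair of anys over the keys
theorem pv_foldA (cnt : Char → Int) (ks : List Char) (init : Bool × Bool) :
    ks.foldl
      (fun (st : Bool × Bool) key =>
        let st := if cnt key == 2 then (true, st.2) else st
        if cnt key == 3 then (st.1, true) else st)
      init
    = (init.1 || ks.any (fun k => cnt k == 2), init.2 || ks.any (fun k => cnt k == 3)) := by
  induction ks generalizing init with
  | nil => simp
  | cons k t ih =>
    simp only [List.foldl_cons, List.any_cons, ih]
    by_cases h2 : cnt k == 2 <;> by_cases h3 : cnt k == 3 <;>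
      simp [h2, h3]

-- run lengths of a sorted list are exactly the multiplicities of its elements
theorem pv_mem_runLengths : ∀ (ys : List Char), ys.Pairwise (· ≤ ·) →
    ∀ n : Int, (n ∈ pvRunLengths ys ↔ ∃ k ∈ ys, (ys.count k : Int) = n) := by
  intro ys
  induction ys using pvRunLengths.induct with
  | case1 => intro _ n; simp [pvRunLengths]
  | case2 c t ih =>
    intro h n
    set a := t.takeWhile (fun x => x == c) with ha
    set b := t.dropWhile (fun x => x == c) with hb
    have hab : a ++ b = t := List.takeWhile_append_dropWhile
    have hc_le : ∀ x ∈ t, c ≤ x := (List.pairwise_cons.1 h).1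
    have ht : t.Pairwise (· ≤ ·) := (List.pairwise_cons.1 h).2
    have hbpw : b.Pairwise (· ≤ ·) := ht.sublist (List.dropWhile_sublist _)
    have hmema : ∀ x ∈ a, x = c := by
      intro x hx
      have := List.mem_takeWhile_imp hx
      simpa using this
    have hcb : c ∉ b := by
      intro hcbmem
      cases hd : b with
      | nil => rw [hd] at hcbmem; simp at hcbmem
      | cons d b' =>
        have hdnec : d ≠ c := by
          have h0 : 0 < (t.dropWhile (fun x => x == c)).length := by
            rw [← hb, hd]; simp
          have h1 := List.dropWhile_get_zero_not (p := fun x => x == c) t h0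
          have hd2 : List.dropWhile (fun x => x == c) t = d :: b' := hb ▸ hd
          simpa [hd2] using h1
        rw [hd] at hcbmem
        rcases List.mem_cons.1 hcbmem with hceq | hcb'
        · exact hdnec hceq.symm
        · have hdt : d ∈ t := (List.dropWhile_sublist _).mem (by rw [← hb, hd]; exact List.mem_cons_self)
          have h1 : c ≤ d := hc_le d hdt
          have h2 : d ≤ c := by
            have := List.pairwise_cons.1 (hd ▸ hbpw)
            exact this.1 c hcb'
          exact hdnec (le_antisymm h2 h1)
    have hacount : a.count c = a.length := List.count_eq_length.2 (by intro x hx; exact (hmema x hx) ▸ rfl)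
    have hbcount : b.count c = 0 := List.count_eq_zero.2 hcb
    have count_c : (c :: t).count c = a.length + 1 := by
      rw [List.count_cons_self, ← hab, List.count_append, hacount, hbcount]
    have count_ne : ∀ k, k ≠ c → (c :: t).count k = b.count k := by
      intro k hk
      rw [List.count_cons_of_ne hk.symm, ← hab, List.count_append]
      have : a.count k = 0 := List.count_eq_zero.2 (fun hka => hk (hmema k hka))
      omega
    rw [show pvRunLengths (c :: t)
        = ((t.takeWhile (fun x => x == c)).length + 1 : Int)
            :: pvRunLengths (t.dropWhile (fun x => x == c)) from by rw [pvRunLengths]]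
    rw [← ha, ← hb, List.mem_cons, ih hbpw n]
    constructor
    · rintro (hn | ⟨k, hkb, hkc⟩)
      · exact ⟨c, List.mem_cons_self, by rw [count_c]; push_cast; omega⟩
      · refine ⟨k, List.mem_cons_of_mem _ ((List.dropWhile_sublist _).mem hkb), ?_⟩
        have hknec : k ≠ c := fun e => hcb (e ▸ hkb)
        rw [count_ne k hknec]; exact hkc
    · rintro ⟨k, hk, hkc⟩
      by_cases hkeq : k = c
      · left; rw [hkeq, count_c] at hkc; push_cast at hkc ⊢; omega
      · right
        have hkt : k ∈ t := (List.mem_cons.1 hk).resolve_left hkeq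
        have hkb : k ∈ b := by
          rw [← hab] at hkt
          rcases List.mem_append.1 hkt with hka | hkb
          · exact absurd (hmema k hka) hkeq
          · exact hkb
        exact ⟨k, hkb, by rw [← count_ne k hkeq]; exact hkc⟩

-- ===== VERDICT (by name: the statement is the Claim_ definition above) =====
theorem parse_box_id_spec : Claim_equal_parse_box_id := by
  intro box_id _
  unfold Spec_parse_box_id parse_box_id parse_box_id_alt
  simp only [pv_foldA, PySem.Dict.keys_counter, PySem.Dict.getD_counter, Bool.false_or]
  have hperm : (PySem.List.sorted box_id.toList (fun c => c) false).Perm box_id.toList :=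
    PySem.List.sorted_perm _ _ _
  have hpw : (PySem.List.sorted box_id.toList (fun c => c) false).Pairwise (· ≤ ·) := by
    have := PySem.List.sorted_pairwise (xs := box_id.toList) (key := fun c => c)
    simpa using this
  have key : ∀ m : Int,
      ((pvRunLengths (PySem.List.sorted box_id.toList (fun c => c) false)).contains m)
      = ((PySem.Set.ofList box_id.toList).any (fun k => (box_id.toList.count k : Int) == m)) := by
    intro m
    rw [Bool.eq_iff_iff]
    simp only [List.contains_iff_mem, List.any_eq_true, beq_iff_eq, PySem.Set.mem_ofList]
    rw [pv_mem_runLengths _ hpw m]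
    constructor
    · rintro ⟨k, hk, hc⟩
      exact ⟨k, hperm.mem_iff.1 hk, by rw [← hperm.count_eq]; exact hc⟩
    · rintro ⟨k, hk, hc⟩
      exact ⟨k, hperm.mem_iff.2 hk, by rw [hperm.count_eq]; exact hc⟩
  simp only [key]
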